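-- pv_equiv track=rewrite | github.com/dipeshtilara/ml-edu-site | src/projects/svm_digits.py | generate_digit_pattern
-- ===== SOURCE A (Python) =====
-- from typing import List, Tuple, Dict, Any, Optional
--
-- def generate_digit_pattern(digit: int, size: int = 8) -> List[List[int]]:
--     """Generate a pattern for a specific digit"""
--     patterns = {
--         0: [[1,1,1,1],
--             [1,0,0,1],
--             [1,0,0,1],
--             [1,0,0,1],
--             [1,0,0,1],
--             [1,0,0,1],
--             [1,1,1,1]],
--
--         1: [[0,0,1,0],
--             [0,1,1,0],
--             [0,0,1,0],
--             [0,0,1,0],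
--             [0,0,1,0],
--             [0,0,1,0],
--             [1,1,1,1]],
--
--         2: [[1,1,1,1],
--             [0,0,0,1],
--             [0,0,0,1],
--             [1,1,1,1],
--             [1,0,0,0],
--             [1,0,0,0],
--             [1,1,1,1]],
--
--         3: [[1,1,1,1],
--             [0,0,0,1],
--             [0,0,0,1],
--             [1,1,1,1],
--             [0,0,0,1],
--             [0,0,0,1],
--             [1,1,1,1]],
--
--         4: [[1,0,0,1],
--             [1,0,0,1],
--             [1,0,0,1],
--             [1,1,1,1],
--             [0,0,0,1],
--             [0,0,0,1],
--             [0,0,0,1]]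
--     }
--
--     base_pattern = patterns.get(digit, patterns[0])
--
--     # Resize pattern to desired size
--     if size == len(base_pattern[0]):
--         return base_pattern
--
--     # Simple scaling (duplicate pixels)
--     scale_factor = size // len(base_pattern[0])
--     scaled_pattern = []
--
--     for row in base_pattern:
--         new_row = []
--         for pixel in row:
--             new_row.extend([pixel] * scale_factor)
--         # Repeat row
--         for _ in range(scale_factor):
--             scaled_pattern.append(new_row[:])
--
--     return scaled_pattern
-- ===== SOURCE B (Python) =====
-- from typing import List
--
-- # Each digit pattern stored as 7 row bitmasks (4 bits, MSB = leftmost pixel).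
-- _CODES = {0: [15, 9, 9, 9, 9, 9, 15],
--           1: [2, 6, 2, 2, 2, 2, 15],
--           2: [15, 1, 1, 15, 8, 8, 15],
--           3: [15, 1, 1, 15, 1, 1, 15],
--           4: [9, 9, 9, 15, 1, 1, 1]}
--
-- def generate_digit_pattern(digit: int, size: int = 8) -> List[List[int]]:
--     """Generate a pattern for a specific digit (bitmask rows, coordinate-mapped scaling)."""
--     rows = _CODES.get(digit, _CODES[0])
--     if size == 4:
--         return [[(r >> (3 - j)) & 1 for j in range(4)] for r in rows]
--     sf = size // 4
--     return [[(rows[i // sf] >> (3 - j // sf)) & 1 for j in range(4 * sf)]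
--             for i in range(len(rows) * sf)]
-- ===== Notes on version B (the rewrite author's own statement) =====
-- stated objective: alternative
-- what changed: B stores each pattern as per-row 4-bit integer bitmasks and computes every output pixel by coordinate mapping (rows[i//sf] >> (3 - j//sf)) & 1 over output index ranges, instead of A's list-of-lists table with pixel-replication (extend) and row-duplication (append copies) loops.
import Mathlib
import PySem

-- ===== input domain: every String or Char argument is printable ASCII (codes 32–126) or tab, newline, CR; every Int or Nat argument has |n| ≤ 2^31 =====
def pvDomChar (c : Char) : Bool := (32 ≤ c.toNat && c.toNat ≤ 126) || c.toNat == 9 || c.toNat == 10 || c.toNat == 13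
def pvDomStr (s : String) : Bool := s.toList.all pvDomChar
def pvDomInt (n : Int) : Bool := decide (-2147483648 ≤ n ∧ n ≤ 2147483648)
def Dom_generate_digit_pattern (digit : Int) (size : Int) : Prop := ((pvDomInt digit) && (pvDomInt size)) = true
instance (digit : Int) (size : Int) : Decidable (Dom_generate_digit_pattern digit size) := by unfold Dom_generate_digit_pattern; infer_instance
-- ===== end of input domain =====

-- B stores each pattern as 4-bit row bitmasks and decodes every output pixel by
-- coordinate mapping (rows[i//sf] >> (3 - j//sf)) & 1, instead of A's list-of-lists
-- table with pixel-replication and row-duplication loops (alternative decomposition).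

-- ===== PORT A =====
-- the dict literal of A's Python
def pvPatterns : PySem.Dict Int (List (List Int)) := PySem.Dict.ofList
  [ (0, [[1,1,1,1],[1,0,0,1],[1,0,0,1],[1,0,0,1],[1,0,0,1],[1,0,0,1],[1,1,1,1]])
  , (1, [[0,0,1,0],[0,1,1,0],[0,0,1,0],[0,0,1,0],[0,0,1,0],[0,0,1,0],[1,1,1,1]])
  , (2, [[1,1,1,1],[0,0,0,1],[0,0,0,1],[1,1,1,1],[1,0,0,0],[1,0,0,0],[1,1,1,1]])
  , (3, [[1,1,1,1],[0,0,0,1],[0,0,0,1],[1,1,1,1],[0,0,0,1],[0,0,0,1],[1,1,1,1]])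
  , (4, [[1,0,0,1],[1,0,0,1],[1,0,0,1],[1,1,1,1],[0,0,0,1],[0,0,0,1],[0,0,0,1]]) ]

-- patterns.get(digit, patterns[0]); base[0] is always in range, ported total via pyGet?/getD
def generate_digit_pattern (digit : Int) (size : Int) : List (List Int) :=
  let base := (pvPatterns.get? digit).getD ((pvPatterns.get? 0).getD [])
  if size = PySem.List.len ((PySem.List.pyGet? base 0).getD []) then base
  else
    let sf := PySem.Int.floordiv size (PySem.List.len ((PySem.List.pyGet? base 0).getD []))
    base.foldl (fun scaled row =>
      let new_row := row.foldl (fun nr pixel => nr ++ PySem.List.pyRepeat [pixel] sf) []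
      (PySem.List.pyRange 0 sf 1).foldl (fun sc _ => sc ++ [new_row]) scaled) []

-- ===== PORT B =====
-- the _CODES dict literal of Source B: per digit, 7 row bitmasks (MSB = leftmost pixel)
def pvCodes : PySem.Dict Int (List Int) := PySem.Dict.ofList
  [ (0, [15, 9, 9, 9, 9, 9, 15])
  , (1, [2, 6, 2, 2, 2, 2, 15])
  , (2, [15, 1, 1, 15, 8, 8, 15])
  , (3, [15, 1, 1, 15, 1, 1, 15])
  , (4, [9, 9, 9, 15, 1, 1, 1]) ]

-- Python's (r >> (3 - j)) & 1; >> is Lean's >>> (Nat shift) and x & 1 via PySem.Int.band.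
-- Exact whenever 3 - j ≥ 0, which holds for every index Source B reaches (j = j'//sf ∈ [0,3]).
def pvBit (r : Int) (j : Int) : Int := PySem.Int.band (r >>> (3 - j).toNat) 1

def generate_digit_pattern_alt (digit : Int) (size : Int) : List (List Int) :=
  let rows := (pvCodes.get? digit).getD ((pvCodes.get? 0).getD [])
  if size = 4 then
    rows.map (fun r => (PySem.List.pyRange 0 4 1).map (fun j => pvBit r j))
  else
    let sf := PySem.Int.floordiv size 4
    (PySem.List.pyRange 0 (PySem.List.len rows * sf) 1).map (fun i =>
      (PySem.List.pyRange 0 (4 * sf) 1).map (fun j =>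
        pvBit (PySem.List.pyGetD rows (PySem.Int.floordiv i sf) 0)
              (PySem.Int.floordiv j sf)))

-- ===== PRECONDITION & SPEC =====
def Spec_generate_digit_pattern (digit : Int) (size : Int) (out : List (List Int)) : Prop := out = generate_digit_pattern_alt digit size
instance (digit : Int) (size : Int) (out : List (List Int)) : Decidable (Spec_generate_digit_pattern digit size out) := by unfold Spec_generate_digit_pattern; infer_instance

-- ===== CLAIM =====
def Claim_equal_generate_digit_pattern : Prop := ∀ (digit : Int) (size : Int), Dom_generate_digit_pattern digit size → Spec_generate_digit_pattern digit size (generate_digit_pattern digit size)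

-- ===== LEMMAS AND PROOFS =====

-- whatever digit is, A's base pattern is exactly the bit-decoding of B's row codes, which are nonempty
lemma pvLookup (digit : Int) :
    ∃ c : List Int, (pvCodes.get? digit).getD ((pvCodes.get? 0).getD []) = c ∧
      (pvPatterns.get? digit).getD ((pvPatterns.get? 0).getD [])
        = c.map (fun r => [pvBit r 0, pvBit r 1, pvBit r 2, pvBit r 3]) ∧
      c ≠ [] := by
  by_cases h0 : digit = 0
  · subst h0; exact ⟨_, rfl, by decide, by decide⟩
  · by_cases h1 : digit = 1
    · subst h1; exact ⟨_, rfl, by decide, by decide⟩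
    · by_cases h2 : digit = 2
      · subst h2; exact ⟨_, rfl, by decide, by decide⟩
      · by_cases h3 : digit = 3
        · subst h3; exact ⟨_, rfl, by decide, by decide⟩
        · by_cases h4 : digit = 4
          · subst h4; exact ⟨_, rfl, by decide, by decide⟩
          · have e0 : (0:Int) ≠ digit := fun h => h0 h.symm
            have e1 : (1:Int) ≠ digit := fun h => h1 h.symm
            have e2 : (2:Int) ≠ digit := fun h => h2 h.symm
            have e3 : (3:Int) ≠ digit := fun h => h3 h.symm
            have e4 : (4:Int) ≠ digit := fun h => h4 h.symm
            have hgp : pvPatterns.get? digit = none := by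
              have hpv : pvPatterns = PySem.Dict.mk
                [ (0, [[1,1,1,1],[1,0,0,1],[1,0,0,1],[1,0,0,1],[1,0,0,1],[1,0,0,1],[1,1,1,1]])
                , (1, [[0,0,1,0],[0,1,1,0],[0,0,1,0],[0,0,1,0],[0,0,1,0],[0,0,1,0],[1,1,1,1]])
                , (2, [[1,1,1,1],[0,0,0,1],[0,0,0,1],[1,1,1,1],[1,0,0,0],[1,0,0,0],[1,1,1,1]])
                , (3, [[1,1,1,1],[0,0,0,1],[0,0,0,1],[1,1,1,1],[0,0,0,1],[0,0,0,1],[1,1,1,1]])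
                , (4, [[1,0,0,1],[1,0,0,1],[1,0,0,1],[1,1,1,1],[0,0,0,1],[0,0,0,1],[0,0,0,1]]) ] := rfl
              rw [hpv]; simp [PySem.Dict.get?, e0, e1, e2, e3, e4]
            have hgc : pvCodes.get? digit = none := by
              have hpc : pvCodes = PySem.Dict.mk
                [ (0, [15, 9, 9, 9, 9, 9, 15])
                , (1, [2, 6, 2, 2, 2, 2, 15])
                , (2, [15, 1, 1, 15, 8, 8, 15])
                , (3, [15, 1, 1, 15, 1, 1, 15])
                , (4, [9, 9, 9, 15, 1, 1, 1]) ] := rfl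
              rw [hpc]; simp [PySem.Dict.get?, e0, e1, e2, e3, e4]
            rw [hgp, hgc]
            exact ⟨_, rfl, by decide, by decide⟩

-- a Nat-range of length m*n mapped through i // n is n copies of each of m values
lemma pvRangeMulMap {α : Type} (n : Nat) (hn : 0 < n) (m : Nat) (f : Nat → α) :
    (List.range (m * n)).map (fun i => f (i / n)) =
      (List.range m).flatMap (fun k => List.replicate n (f k)) := by
  induction m with
  | zero => simp
  | succ m ih =>
    have hmn : (m + 1) * n = m * n + n := by ring
    rw [hmn, List.range_add, List.map_append, ih, List.range_succ,
      List.flatMap_append]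
    congr 1
    simp only [List.map_map, List.flatMap_cons, List.flatMap_nil, List.append_nil]
    have hdiv : ∀ j ∈ List.range n, f ((m * n + j) / n) = f m := by
      intro j hj
      rw [List.mem_range] at hj
      congr 1
      rw [Nat.mul_comm m n, Nat.mul_add_div hn, Nat.div_eq_of_lt hj, Nat.add_zero]
    calc (List.range n).map (fun j => f ((m * n + j) / n))
        = (List.range n).map (fun _ => f m) := List.map_congr_left hdiv
      _ = List.replicate n (f m) := by
          rw [List.map_const']; simp

-- indexing a list over range(len) is the list itself, under any default
lemma pvFlatMapRangeGetD {α β : Type} (xs : List α) (d : α) (g : α → List β) :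
    (List.range xs.length).flatMap (fun k => g (xs.getD k d)) = xs.flatMap g := by
  unfold List.flatMap
  congr 1
  apply List.ext_getElem
  · simp
  · intro k h1 h2
    simp [List.getD_eq_getElem?_getD, List.getElem?_eq_getElem (by simpa using h1)]

-- one bitmask row, stretched: replicating each decoded pixel n times = decoding j // n
lemma pvRowStretch (n : Nat) (hn : 0 < n) (r : Int) :
    ([pvBit r 0, pvBit r 1, pvBit r 2, pvBit r 3].flatMap (fun p => List.replicate n p))
      = (List.range (4 * n)).map (fun j => pvBit r ((j / n : Nat) : Int)) := by
  rw [pvRangeMulMap n hn 4 (fun k => pvBit r ((k : Nat) : Int))]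
  have h4 : List.range 4 = [0, 1, 2, 3] := by decide
  rw [h4]
  norm_num [List.flatMap_cons, List.flatMap_nil]

-- the core scaling equivalence: A's replication fold on decoded rows = B's coordinate map on codes
lemma pvScale_eq (c : List Int) (sf : Int) :
    (c.map (fun r => [pvBit r 0, pvBit r 1, pvBit r 2, pvBit r 3])).foldl (fun scaled row =>
        let new_row := row.foldl (fun nr pixel => nr ++ PySem.List.pyRepeat [pixel] sf) []
        (PySem.List.pyRange 0 sf 1).foldl (fun sc _ => sc ++ [new_row]) scaled) []
    = (PySem.List.pyRange 0 (PySem.List.len c * sf) 1).map (fun i =>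
        (PySem.List.pyRange 0 (4 * sf) 1).map (fun j =>
          pvBit (PySem.List.pyGetD c (PySem.Int.floordiv i sf) 0)
                (PySem.Int.floordiv j sf))) := by
  by_cases hsf : sf ≤ 0
  · rw [PySem.List.pyRange_one_eq_nil hsf,
        PySem.List.pyRange_one_eq_nil (a := 0) (b := PySem.List.len c * sf)
          (by
            have hlen : (0:Int) ≤ PySem.List.len c := by
              rw [PySem.List.len_eq]; positivity
            exact mul_nonpos_of_nonneg_of_nonpos hlen hsf)]
    simp
  · have hsf : (0:Int) < sf := lt_of_not_ge hsf
    obtain ⟨n, rfl⟩ : ∃ n : Nat, sf = (n : Int) := ⟨sf.toNat, (Int.toNat_of_nonneg hsf.le).symm⟩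
    have hn : 0 < n := by exact_mod_cast hsf
    -- LHS: the extend/append loops in flatMap/replicate shape
    have hstretch : ∀ row : List Int,
        row.foldl (fun nr pixel => nr ++ PySem.List.pyRepeat [pixel] ((n : Int))) []
          = row.flatMap (fun p => List.replicate n p) := by
      intro row
      rw [PySem.List.foldl_append_eq_flatMap (fun p => PySem.List.pyRepeat [p] ((n : Int)))]
      simp [PySem.List.pyRepeat_singleton]
    have hrep : ∀ (x : List Int) (acc : List (List Int)),
        (PySem.List.pyRange 0 ((n : Int)) 1).foldl (fun sc _ => sc ++ [x]) acc
          = acc ++ List.replicate n x := by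
      intro x acc
      rw [PySem.List.foldl_append_singleton_eq_map (fun _ => x), List.map_const']
      congr 1
      simp [PySem.List.length_pyRange_one]
    have hL1 : ∀ b : List (List Int), b.foldl (fun scaled row =>
        let new_row := row.foldl (fun nr pixel => nr ++ PySem.List.pyRepeat [pixel] ((n:Int))) []
        (PySem.List.pyRange 0 ((n:Int)) 1).foldl (fun sc _ => sc ++ [new_row]) scaled) []
        = b.flatMap (fun row => List.replicate n (row.flatMap (fun p => List.replicate n p))) := by
      intro b
      calc b.foldl (fun scaled row =>
            let new_row := row.foldl (fun nr pixel => nr ++ PySem.List.pyRepeat [pixel] ((n:Int))) []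
            (PySem.List.pyRange 0 ((n:Int)) 1).foldl (fun sc _ => sc ++ [new_row]) scaled) []
          = b.foldl (fun scaled row =>
            scaled ++ List.replicate n (row.flatMap (fun p => List.replicate n p))) [] := by
            apply PySem.List.foldl_congr_mem
            intro acc row _
            simp only [hstretch row, hrep]
        _ = [] ++ b.flatMap (fun row => List.replicate n (row.flatMap (fun p => List.replicate n p))) :=
            PySem.List.foldl_append_eq_flatMap _ b []
        _ = _ := List.nil_append _
    rw [hL1]
    -- fold over the decoded rows = fold over the codes, decoded pointwise
    rw [List.flatMap]
    rw [List.map_map]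
    rw [← List.flatMap]
    -- RHS: cast the ranges to Nat and apply the division lemmas
    have hcast : PySem.List.len c * ((n:Int)) = ((c.length * n : Nat) : Int) := by
      rw [PySem.List.len_eq]; push_cast; ring
    have hcast4 : (4 : Int) * ((n:Int)) = ((4 * n : Nat) : Int) := by push_cast; ring
    rw [hcast, PySem.List.pyRange_zero_nat, hcast4, PySem.List.pyRange_zero_nat]
    simp only [List.map_map, Function.comp_def, PySem.Int.floordiv_natCast,
      PySem.List.pyGetD_natCast]
    rw [pvRangeMulMap n hn c.length
      (fun k => (List.range (4*n)).map (fun j => pvBit (c.getD k 0) ((j / n : Nat) : Int)))]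
    refine Eq.trans ?_ (pvFlatMapRangeGetD c 0
      (fun r => List.replicate n ((List.range (4*n)).map (fun j => pvBit r ((j / n : Nat) : Int))))).symm
    unfold List.flatMap
    congr 1
    apply List.map_congr_left
    intro r _
    congr 1
    exact pvRowStretch n hn r

-- ===== VERDICT (by name: the statement is the Claim_ definition above) =====
theorem generate_digit_pattern_spec : Claim_equal_generate_digit_pattern := by
  intro digit size _
  unfold Spec_generate_digit_pattern generate_digit_pattern generate_digit_pattern_alt
  obtain ⟨c, hc, hb, hne⟩ := pvLookup digit
  dsimp only
  rw [hc, hb]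
  have h4 : PySem.List.len ((PySem.List.pyGet?
      (c.map (fun r => [pvBit r 0, pvBit r 1, pvBit r 2, pvBit r 3])) 0).getD []) = 4 := by
    cases c with
    | nil => exact absurd rfl hne
    | cons r t =>
      rw [List.map_cons, PySem.List.pyGet?_zero_cons]
      simp [PySem.List.len_eq]
  rw [h4]
  by_cases hsz : size = 4
  · simp only [hsz]
    apply List.map_congr_left
    intro r _
    have hr : PySem.List.pyRange 0 4 1 = [0, 1, 2, 3] := by decide
    rw [hr]
    rfl
  · simp only [if_neg hsz]
    exact pvScale_eq c (PySem.Int.floordiv size 4)
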